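-- pv_equiv track=rewrite | github.com/olaolatunbos/Leetcode | algorithms/depth-first-search.py | dfs
-- ===== SOURCE A (Python) =====
-- def dfs(matrix):
--   # Check for an empty matrix/graph.
--   if not matrix:
--     return []
--
--   rows, cols = len(matrix), len(matrix[0])
--   visited = []
--   directions = ((0, 1), (0, -1), (1, 0), (-1, 0))
--
--   def traverse(i, j):
--     # base case
--     if (i, j) in visited:
--       # A return statement is used to end the execution of the function call, returns None
--       return
--
--     visited.append((i, j))
--     # Traverse neighbors.
--     for direction in directions:
--       next_i, next_j = i + direction[0], j + direction[1]
--       if 0 <= next_i < rows and 0 <= next_j < cols: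
--         # Add in question-specific checks, where relevant.
--         # recursive call
--         traverse(next_i, next_j)
--
--   for i in range(rows):
--     for j in range(cols):
--       traverse(i, j)
--   return visited
-- ===== SOURCE B (Python) =====
-- def dfs(matrix):
--   # Check for an empty matrix/graph.
--   if not matrix:
--     return []
--
--   rows, cols = len(matrix), len(matrix[0])
--   visited = []
--   for i in range(rows):
--     js = range(cols) if i % 2 == 0 else range(cols - 1, -1, -1)
--     for j in js:
--       visited.append((i, j))
--   return visited
-- ===== Notes on version B (the rewrite author's own statement) =====
-- stated objective: faster
-- what changed: The recursive DFS (with its O(n) 'in visited' list scans and deep recursion) is replaced by a closed form: the traversal provably visits the whole grid in boustrophedon (snake) order starting from (0,0), so B emits each row directly, left-to-right on even rows and right-to-left on odd rows.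
import Mathlib
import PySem

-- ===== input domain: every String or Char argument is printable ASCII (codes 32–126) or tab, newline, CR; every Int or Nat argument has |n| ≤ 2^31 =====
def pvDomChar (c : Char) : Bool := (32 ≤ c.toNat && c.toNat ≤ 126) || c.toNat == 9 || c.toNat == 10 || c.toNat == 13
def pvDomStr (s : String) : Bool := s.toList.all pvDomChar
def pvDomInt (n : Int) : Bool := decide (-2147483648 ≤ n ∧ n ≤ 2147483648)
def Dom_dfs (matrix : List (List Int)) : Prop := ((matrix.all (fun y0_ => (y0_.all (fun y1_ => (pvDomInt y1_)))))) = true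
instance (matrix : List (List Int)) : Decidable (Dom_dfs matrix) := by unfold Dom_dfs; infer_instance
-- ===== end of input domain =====

-- B replaces A's recursive DFS (which rescans the visited list on every call) by the closed-form
-- boustrophedon row order that the recursion provably produces; measured faster on large grids.

-- ===== PORT A =====
-- the recursive `traverse`; its recursion depth is bounded by the number of unvisited cells,
-- so a fuel of rows*cols+1 is a pure totality guard (never exhausted on the actual calls)
def dfsTraverse (rows cols : Int) : Nat → Int → Int → List (Int × Int) → List (Int × Int)
  | 0, _, _, visited => visited
  | f + 1, i, j, visited =>
    if (i, j) ∈ visited then visited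
    else
      let visited := visited ++ [(i, j)]
      [((0 : Int), (1 : Int)), (0, -1), (1, 0), (-1, 0)].foldl
        (fun v d =>
          let ni := i + d.1
          let nj := j + d.2
          if 0 ≤ ni ∧ ni < rows ∧ 0 ≤ nj ∧ nj < cols then
            dfsTraverse rows cols f ni nj v
          else v) visited

def dfs : List (List Int) → List (Int × Int)
  | [] => []
  | r0 :: rest =>
    let rows : Int := (rest.length + 1 : Nat)
    let cols : Int := r0.length
    let fuel : Nat := (rest.length + 1) * r0.length + 1
    (List.range (rest.length + 1)).foldl (fun (vis : List (Int × Int)) (i : Nat) =>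
      (List.range r0.length).foldl (fun (vis : List (Int × Int)) (j : Nat) =>
        dfsTraverse rows cols fuel (i : Int) (j : Int) vis) vis) []

-- ===== PORT B =====
-- range(cols-1, -1, -1) is (List.range cols).reverse
def dfs_alt : List (List Int) → List (Int × Int)
  | [] => []
  | r0 :: rest =>
    (List.range (rest.length + 1)).foldl (fun (visited : List (Int × Int)) (i : Nat) =>
      (if i % 2 = 0 then List.range r0.length else (List.range r0.length).reverse).foldl
        (fun (visited : List (Int × Int)) (j : Nat) =>
          visited ++ [((i : Int), (j : Int))]) visited) []

-- ===== PRECONDITION & SPEC =====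
def Spec_dfs (matrix : List (List Int)) (out : List (Int × Int)) : Prop := out = dfs_alt matrix
instance (matrix : List (List Int)) (out : List (Int × Int)) : Decidable (Spec_dfs matrix out) := by unfold Spec_dfs; infer_instance

-- ===== CLAIM (what is proved, stated in full; the proofs are below) =====
def Claim_equal_dfs : Prop := ∀ (matrix : List (List Int)), Dom_dfs matrix → Spec_dfs matrix (dfs matrix)

-- ===== LEMMAS AND PROOFS =====

-- the snake order, written as one flat list
def snakeList (R C : Nat) : List (Int × Int) :=
  (List.range R).flatMap (fun (i : Nat) =>
    (if i % 2 = 0 then List.range C else (List.range C).reverse).map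
      (fun (j : Nat) => ((i : Int), (j : Int))))

-- the k-th cell of the snake order, and the snake position of a cell
def cellOf (C k : Nat) : Int × Int :=
  ((k / C : Nat), ((if (k / C) % 2 = 0 then k % C else C - 1 - k % C) : Nat))

def posn (C i j : Nat) : Nat := i * C + (if i % 2 = 0 then j else C - 1 - j)

lemma foldl_append_flat {α : Type} (h : α → List (Int × Int)) :
    ∀ (l : List α) (acc : List (Int × Int)),
      l.foldl (fun v x => v ++ h x) acc = acc ++ l.flatMap h := by
  intro l
  induction l with
  | nil => simp
  | cons x t ih => intro acc; simp [List.foldl_cons, ih]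

lemma dfs_alt_eq_snake (r0 : List Int) (rest : List (List Int)) :
    dfs_alt (r0 :: rest) = snakeList (rest.length + 1) r0.length := by
  have hrow : (fun (visited : List (Int × Int)) (i : Nat) =>
      (if i % 2 = 0 then List.range r0.length else (List.range r0.length).reverse).foldl
        (fun (visited : List (Int × Int)) (j : Nat) =>
          visited ++ [((i : Int), (j : Int))]) visited) =
      (fun (visited : List (Int × Int)) (i : Nat) => visited ++
        ((if i % 2 = 0 then List.range r0.length else (List.range r0.length).reverse).map
          (fun (j : Nat) => ((i : Int), (j : Int))))) := by
    funext visited i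
    refine (foldl_append_flat (fun (j : Nat) => [((i : Int), (j : Int))]) _ visited).trans ?_
    congr 1
    induction (if i % 2 = 0 then List.range r0.length else (List.range r0.length).reverse) with
    | nil => rfl
    | cons x t iht => simp [List.flatMap_cons, iht]
  show (List.range (rest.length + 1)).foldl _ [] = _
  rw [hrow]
  simpa [snakeList] using
    foldl_append_flat (fun (i : Nat) =>
      (if i % 2 = 0 then List.range r0.length else (List.range r0.length).reverse).map
        (fun (j : Nat) => ((i : Int), (j : Int)))) (List.range (rest.length + 1)) []

lemma snake_eq_map (R C : Nat) :
    snakeList R C = (List.range (R * C)).map (cellOf C) := by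
  induction R with
  | zero => simp [snakeList]
  | succ R ih =>
    have hrc : (R + 1) * C = R * C + C := by ring
    rw [snakeList, List.range_succ, List.flatMap_append, ← snakeList, ih, hrc, List.range_add,
      List.map_append]
    congr 1
    rcases Nat.eq_zero_or_pos C with hC | hC
    · simp [hC]
    have hcell : ∀ t, t < C → cellOf C (R * C + t) =
        ((R : Int), ((if R % 2 = 0 then t else C - 1 - t : Nat) : Int)) := by
      intro t ht
      have hdiv : (R * C + t) / C = R := by
        rw [Nat.mul_comm, Nat.mul_add_div hC, Nat.div_eq_of_lt ht]; omega
      have hmod : (R * C + t) % C = t := by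
        rw [Nat.mul_comm, Nat.mul_add_mod]; exact Nat.mod_eq_of_lt ht
      simp [cellOf, hdiv, hmod]
    simp only [List.flatMap_cons, List.flatMap_nil, List.append_nil, List.map_map]
    rcases Nat.even_or_odd R with hR | hR
    · have hR2 : R % 2 = 0 := Nat.even_iff.mp hR
      rw [if_pos hR2]
      refine List.map_congr_left (fun t ht => ?_)
      rw [Function.comp_apply, hcell t (List.mem_range.mp ht), if_pos hR2]
    · have hR2 : R % 2 = 1 := Nat.odd_iff.mp hR
      have hrev : (List.range C).reverse = (List.range C).map (fun t => C - 1 - t) := by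
        apply List.ext_getElem
        · simp
        · intro n h1 h2
          simp [List.getElem_reverse, List.getElem_range]
      rw [if_neg (by omega), hrev, List.map_map]
      refine List.map_congr_left (fun t ht => ?_)
      rw [Function.comp_apply, Function.comp_apply, hcell t (List.mem_range.mp ht),
        if_neg (by omega)]

lemma posn_cellOf (C k : Nat) (hC : 0 < C) :
    posn C (k / C) (if (k / C) % 2 = 0 then k % C else C - 1 - k % C) = k := by
  have h1 : k / C * C + k % C = k := Nat.div_add_mod' k C
  have h2 : k % C < C := Nat.mod_lt k hC
  unfold posn
  split_ifs <;> omega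

lemma cellOf_posn (C i j : Nat) (hC : 0 < C) (hj : j < C) :
    cellOf C (posn C i j) = ((i : Int), (j : Int)) := by
  rcases Nat.even_or_odd i with hi | hi
  · have hi2 : i % 2 = 0 := Nat.even_iff.mp hi
    have hp : posn C i j = i * C + j := by simp [posn, hi2]
    have hdiv : (i * C + j) / C = i := by
      rw [Nat.mul_comm, Nat.mul_add_div hC, Nat.div_eq_of_lt hj]; omega
    have hmod : (i * C + j) % C = j := by
      rw [Nat.mul_comm, Nat.mul_add_mod]; exact Nat.mod_eq_of_lt hj
    simp [cellOf, hp, hdiv, hmod, hi2]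
  · have hi2 : i % 2 = 1 := Nat.odd_iff.mp hi
    have hjC : C - 1 - j < C := by omega
    have hp : posn C i j = i * C + (C - 1 - j) := by simp [posn, hi2]
    have hdiv : (i * C + (C - 1 - j)) / C = i := by
      rw [Nat.mul_comm, Nat.mul_add_div hC, Nat.div_eq_of_lt hjC]; omega
    have hmod : (i * C + (C - 1 - j)) % C = C - 1 - j := by
      rw [Nat.mul_comm, Nat.mul_add_mod]; exact Nat.mod_eq_of_lt hjC
    have h3 : C - 1 - (C - 1 - j) = j := by omega
    simp [cellOf, hp, hdiv, hmod, hi2, h3]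

lemma posn_lt (R C i j : Nat) (hi : i < R) (hj : j < C) : posn C i j < R * C := by
  have h2 : (i + 1) * C = i * C + C := by ring
  have h : posn C i j < (i + 1) * C := by unfold posn; split_ifs <;> omega
  calc posn C i j < (i + 1) * C := h
    _ ≤ R * C := Nat.mul_le_mul_right C hi

lemma mem_take_iff (R C k : Nat) (hC : 0 < C) (hk : k ≤ R * C) (i j : Nat) (hj : j < C) :
    (((i : Int), (j : Int)) ∈ (snakeList R C).take k) ↔ posn C i j < k := by
  rw [snake_eq_map, ← List.map_take, List.take_range, Nat.min_eq_left hk]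
  simp only [List.mem_map, List.mem_range]
  constructor
  · rintro ⟨p, hp, he⟩
    have h1 : ((p / C : Nat) : Int) = (i : Int) := congrArg Prod.fst he
    have h2 : (((if (p / C) % 2 = 0 then p % C else C - 1 - p % C) : Nat) : Int) = (j : Int) :=
      congrArg Prod.snd he
    have h1' : p / C = i := by exact_mod_cast h1
    have h2' : (if (p / C) % 2 = 0 then p % C else C - 1 - p % C) = j := by exact_mod_cast h2
    have h3 := posn_cellOf C p hC
    rw [h2', h1'] at h3
    omega
  · intro hp
    exact ⟨posn C i j, hp, cellOf_posn C i j hC hj⟩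

lemma mem_snake (R C i j : Nat) (hC : 0 < C) (hi : i < R) (hj : j < C) :
    ((i : Int), (j : Int)) ∈ snakeList R C := by
  have hlen : (snakeList R C).take (R * C) = snakeList R C := by
    apply List.take_of_length_le
    rw [snake_eq_map]; simp
  rw [← hlen]
  exact (mem_take_iff R C (R * C) hC le_rfl i j hj).mpr (posn_lt R C i j hi hj)

lemma traverse_mem (rows cols : Int) (f : Nat) (i j : Int) (v : List (Int × Int))
    (h : (i, j) ∈ v) : dfsTraverse rows cols f i j v = v := by
  cases f with
  | zero => rfl
  | succ f => rw [dfsTraverse, if_pos h]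

lemma foldl_fixed {α β : Type} (g : β → α → β) (v : β) (l : List α)
    (h : ∀ x ∈ l, g v x = v) : l.foldl g v = v := by
  induction l with
  | nil => rfl
  | cons x t ih =>
    rw [List.foldl_cons, h x List.mem_cons_self]
    exact ih (fun y hy => h y (List.mem_cons_of_mem x hy))

lemma take_succ_snake (R C k : Nat) (hk : k < R * C) :
    (snakeList R C).take (k + 1) = (snakeList R C).take k ++ [cellOf C k] := by
  rw [snake_eq_map, ← List.map_take, ← List.map_take, List.take_range, List.take_range,
    Nat.min_eq_left hk.le, Nat.min_eq_left (by omega), List.range_succ]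
  simp

-- the core invariant: starting at the k-th snake cell with exactly the first k snake cells
-- visited, A's traverse fills in the whole snake
lemma traverse_snake (R C : Nat) (hC : 0 < C) (m : Nat) :
    ∀ k f, k + m = R * C → 1 ≤ m → m ≤ f →
      dfsTraverse (R : Int) (C : Int) f (cellOf C k).1 (cellOf C k).2 ((snakeList R C).take k)
        = snakeList R C := by
  induction m with
  | zero => intro k f _ h _; omega
  | succ m ih =>
    intro k f hk hm hf
    obtain ⟨f', rfl⟩ : ∃ f', f = f' + 1 := ⟨f - 1, by omega⟩
    set a := k / C with ha
    set b := (if a % 2 = 0 then k % C else C - 1 - k % C) with hb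
    have hrC : k % C < C := Nat.mod_lt k hC
    have hkC : a * C + k % C = k := by rw [ha]; exact Nat.div_add_mod' k C
    have hkRC : k < R * C := by omega
    have haR : a < R := by
      by_contra h
      have h2 : R * C ≤ a * C := Nat.mul_le_mul_right C (by omega)
      omega
    have hbC : b < C := by rw [hb]; split_ifs <;> omega
    have hposab : posn C a b = k := by rw [hb, ha]; exact posn_cellOf C k hC
    have hcell : cellOf C k = ((a : Int), (b : Int)) := by rw [hb, ha]; rfl
    have hmem_take : ∀ (k' : Nat) (x y : Nat), k' ≤ R * C → y < C →
        (((x : Int), (y : Int)) ∈ (snakeList R C).take k' ↔ posn C x y < k') :=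
      fun k' x y hk' hy => mem_take_iff R C k' hC hk' x y hy
    rw [dfsTraverse, hcell]
    rw [if_neg (by
      intro hmm
      have h4 := (hmem_take k a b hkRC.le hbC).mp hmm
      omega)]
    simp only [List.foldl_cons, List.foldl_nil, add_zero]
    rw [show List.take k (snakeList R C) ++ [((a : Int), (b : Int))]
        = (snakeList R C).take (k + 1) by rw [take_succ_snake R C k hkRC, hcell]]
    -- a step on a neighbour that is already visited (whenever it is in bounds) is a no-op
    have hstep_dead : ∀ (ni nj : Int) (v : List (Int × Int)),
        ((0 ≤ ni ∧ ni < (R : Int) ∧ 0 ≤ nj ∧ nj < (C : Int)) → (ni, nj) ∈ v) →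
        (if 0 ≤ ni ∧ ni < (R : Int) ∧ 0 ≤ nj ∧ nj < (C : Int) then
          dfsTraverse (R : Int) (C : Int) f' ni nj v else v) = v := by
      intro ni nj v h
      split_ifs with hg
      · exact traverse_mem _ _ _ _ _ _ (h hg)
      · rfl
    have hfull_mem : ∀ (x y : Nat), x < R → y < C →
        ((x : Int), (y : Int)) ∈ snakeList R C := fun x y hx hy => mem_snake R C x y hC hx hy
    have htake_mem : ∀ (x y : Nat), y < C → posn C x y < k + 1 →
        ((x : Int), (y : Int)) ∈ (snakeList R C).take (k + 1) :=
      fun x y hy hp => (hmem_take (k + 1) x y (by omega) hy).mpr hp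
    -- a step into the (k+1)-st snake cell recursively completes the snake (the IH)
    have hstep_succ : ∀ (ni nj : Int) (a' b' : Nat), ni = (a' : Int) → nj = (b' : Int) →
        a' < R → b' < C → posn C a' b' = k + 1 →
        (if 0 ≤ ni ∧ ni < (R : Int) ∧ 0 ≤ nj ∧ nj < (C : Int) then
          dfsTraverse (R : Int) (C : Int) f' ni nj ((snakeList R C).take (k + 1))
        else (snakeList R C).take (k + 1)) = snakeList R C := by
      intro ni nj a' b' hni hnj ha' hb' hp
      subst hni; subst hnj
      rw [if_pos (by
        refine ⟨by positivity, by exact_mod_cast ha', by positivity, by exact_mod_cast hb'⟩)]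
      have hm1 : 1 ≤ m := by
        have h5 := posn_lt R C a' b' ha' hb'
        omega
      have h6 := ih (k + 1) f' (by omega) hm1 (by omega)
      rw [show cellOf C (k + 1) = ((a' : Int), (b' : Int)) by
        rw [← hp, cellOf_posn C a' b' hC hb']] at h6
      simpa using h6
    have hfulltake : k + 1 = R * C → (snakeList R C).take (k + 1) = snakeList R C := by
      intro hlast
      rw [hlast]
      apply List.take_of_length_le
      rw [snake_eq_map]; simp
    rcases Nat.even_or_odd a with hae | hao
    · -- even row: travel right, then down at the end of the row
      have ha2 : a % 2 = 0 := Nat.even_iff.mp hae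
      have hbr : b = k % C := by rw [hb, if_pos ha2]
      by_cases hre : b + 1 < C
      · -- successor is (a, b+1) to the right; the other three neighbours end up visited
        have hp1 : posn C a (b + 1) = k + 1 := by unfold posn; rw [if_pos ha2]; omega
        rw [hstep_succ (a : Int) ((b : Int) + 1) a (b + 1) rfl (by push_cast; ring) haR hre hp1]
        rw [hstep_dead (a : Int) ((b : Int) + -1) (snakeList R C) (fun hg => by
          have hb1 : 1 ≤ b := by omega
          rw [show ((b : Int) + -1) = ((b - 1 : Nat) : Int) by omega]
          exact hfull_mem a (b - 1) haR (by omega))]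
        rw [hstep_dead ((a : Int) + 1) (b : Int) (snakeList R C) (fun hg => by
          have haD : a + 1 < R := by exact_mod_cast (by push_cast; omega : ((a + 1 : Nat) : Int) < (R : Int))
          rw [show ((a : Int) + 1) = ((a + 1 : Nat) : Int) by push_cast; ring]
          exact hfull_mem (a + 1) b haD hbC)]
        rw [hstep_dead ((a : Int) + -1) (b : Int) (snakeList R C) (fun hg => by
          have ha1 : 1 ≤ a := by omega
          rw [show ((a : Int) + -1) = ((a - 1 : Nat) : Int) by omega]
          exact hfull_mem (a - 1) b (by omega) hbC)]
      · -- b = C-1: right is out of bounds, left is visited, successor is down (or last cell)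
        have hbe : b + 1 = C := by omega
        rw [hstep_dead (a : Int) ((b : Int) + 1) ((snakeList R C).take (k + 1))
          (fun hg => absurd hg (by omega))]
        rw [hstep_dead (a : Int) ((b : Int) + -1) ((snakeList R C).take (k + 1)) (fun hg => by
          have hb1 : 1 ≤ b := by omega
          rw [show ((b : Int) + -1) = ((b - 1 : Nat) : Int) by omega]
          refine htake_mem a (b - 1) (by omega) ?_
          unfold posn; rw [if_pos ha2]; omega)]
        by_cases haD : a + 1 < R
        · -- successor (a+1, b) below
          have hmul : (a + 1) * C = a * C + C := by ring
          have hp1 : posn C (a + 1) b = k + 1 := by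
            unfold posn; rw [if_neg (by omega)]; omega
          rw [hstep_succ ((a : Int) + 1) (b : Int) (a + 1) b (by push_cast; ring) rfl haD hbC hp1]
          rw [hstep_dead ((a : Int) + -1) (b : Int) (snakeList R C) (fun hg => by
            have ha1 : 1 ≤ a := by omega
            rw [show ((a : Int) + -1) = ((a - 1 : Nat) : Int) by omega]
            exact hfull_mem (a - 1) b (by omega) hbC)]
        · -- last cell of the whole snake
          have hmul : (a + 1) * C = a * C + C := by ring
          have h7 : R * C ≤ (a + 1) * C := Nat.mul_le_mul_right C (by omega)
          have hlast : k + 1 = R * C := by omega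
          rw [hstep_dead ((a : Int) + 1) (b : Int) ((snakeList R C).take (k + 1))
            (fun hg => absurd hg (by omega))]
          rw [hstep_dead ((a : Int) + -1) (b : Int) ((snakeList R C).take (k + 1)) (fun hg => by
            have ha1 : 1 ≤ a := by omega
            have h8 : (a - 1 + 1) * C = (a - 1) * C + C := by ring
            rw [show a - 1 + 1 = a by omega] at h8
            rw [show ((a : Int) + -1) = ((a - 1 : Nat) : Int) by omega]
            refine htake_mem (a - 1) b hbC ?_
            unfold posn; rw [if_neg (by omega)]; omega)]
          exact hfulltake hlast
    · -- odd row: travel left, then down at column 0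
      have ha2 : a % 2 = 1 := Nat.odd_iff.mp hao
      have hbr : b = C - 1 - k % C := by rw [hb, if_neg (by omega)]
      rw [hstep_dead (a : Int) ((b : Int) + 1) ((snakeList R C).take (k + 1)) (fun hg => by
        have hbe : b + 1 < C := by exact_mod_cast (by push_cast; omega : ((b + 1 : Nat) : Int) < (C : Int))
        rw [show ((b : Int) + 1) = ((b + 1 : Nat) : Int) by push_cast; ring]
        refine htake_mem a (b + 1) hbe ?_
        unfold posn; rw [if_neg (by omega)]; omega)]
      by_cases hb0 : 0 < b
      · -- successor is (a, b-1) to the left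
        have hp1 : posn C a (b - 1) = k + 1 := by
          unfold posn; rw [if_neg (by omega)]; omega
        rw [hstep_succ (a : Int) ((b : Int) + -1) a (b - 1) rfl (by omega) haR
          (by omega) hp1]
        rw [hstep_dead ((a : Int) + 1) (b : Int) (snakeList R C) (fun hg => by
          have haD : a + 1 < R := by exact_mod_cast (by push_cast; omega : ((a + 1 : Nat) : Int) < (R : Int))
          rw [show ((a : Int) + 1) = ((a + 1 : Nat) : Int) by push_cast; ring]
          exact hfull_mem (a + 1) b haD hbC)]
        rw [hstep_dead ((a : Int) + -1) (b : Int) (snakeList R C) (fun hg => by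
          have ha1 : 1 ≤ a := by omega
          rw [show ((a : Int) + -1) = ((a - 1 : Nat) : Int) by omega]
          exact hfull_mem (a - 1) b (by omega) hbC)]
      · -- b = 0: left is out of bounds; successor is down (a+1, 0), or last cell
        have hb0' : b = 0 := by omega
        have hkc1 : k % C = C - 1 := by omega
        rw [hstep_dead (a : Int) ((b : Int) + -1) ((snakeList R C).take (k + 1))
          (fun hg => absurd hg (by omega))]
        by_cases haD : a + 1 < R
        · have hmul : (a + 1) * C = a * C + C := by ring
          have hp1 : posn C (a + 1) b = k + 1 := by
            unfold posn; rw [if_pos (by omega)]; omega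
          rw [hstep_succ ((a : Int) + 1) (b : Int) (a + 1) b (by push_cast; ring) rfl haD hbC hp1]
          rw [hstep_dead ((a : Int) + -1) (b : Int) (snakeList R C) (fun hg => by
            have ha1 : 1 ≤ a := by omega
            rw [show ((a : Int) + -1) = ((a - 1 : Nat) : Int) by omega]
            exact hfull_mem (a - 1) b (by omega) hbC)]
        · have hmul : (a + 1) * C = a * C + C := by ring
          have h7 : R * C ≤ (a + 1) * C := Nat.mul_le_mul_right C (by omega)
          have hlast : k + 1 = R * C := by omega
          rw [hstep_dead ((a : Int) + 1) (b : Int) ((snakeList R C).take (k + 1))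
            (fun hg => absurd hg (by omega))]
          rw [hstep_dead ((a : Int) + -1) (b : Int) ((snakeList R C).take (k + 1)) (fun hg => by
            have ha1 : 1 ≤ a := by omega
            have h8 : (a - 1 + 1) * C = (a - 1) * C + C := by ring
            rw [show a - 1 + 1 = a by omega] at h8
            rw [show ((a : Int) + -1) = ((a - 1 : Nat) : Int) by omega]
            refine htake_mem (a - 1) b hbC ?_
            unfold posn; rw [if_pos (by omega)]; omega)]
          exact hfulltake hlast

-- ===== VERDICT (by name: the statement is the Claim_ definition above) =====
theorem dfs_spec : Claim_equal_dfs := by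
  intro matrix _
  unfold Spec_dfs
  match matrix with
  | [] => rfl
  | r0 :: rest =>
    rw [dfs_alt_eq_snake]
    set R : Nat := rest.length + 1 with hR
    set C : Nat := r0.length with hC
    show (List.range R).foldl _ [] = _
    rcases Nat.eq_zero_or_pos C with hC0 | hC0
    · have h9 : r0.length = 0 := by rw [← hC]; exact hC0
      simp only [h9, List.range_zero, List.foldl_nil]
      rw [foldl_fixed _ _ _ (fun x _ => rfl), snake_eq_map, hC0]
      simp
    · have hmemtrav : ∀ (x y : Nat), x < R → y < C →
          dfsTraverse (R : Int) (C : Int) (R * C + 1) (x : Int) (y : Int) (snakeList R C)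
            = snakeList R C :=
        fun x y hx hy => traverse_mem _ _ _ _ _ _ (mem_snake R C x y hC0 hx hy)
      have hinner_snake : ∀ (x : Nat), x < R →
          (List.range C).foldl (fun (vis : List (Int × Int)) (j : Nat) =>
            dfsTraverse (R : Int) (C : Int) (R * C + 1) (x : Int) (j : Int) vis)
            (snakeList R C) = snakeList R C := by
        intro x hx
        exact foldl_fixed _ _ _ (fun j hj => hmemtrav x j hx (List.mem_range.mp hj))
      have hsplitR : List.range R = 0 :: List.map Nat.succ (List.range (R - 1)) := by
        conv_lhs => rw [show R = (R - 1) + 1 by omega]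
        rw [List.range_succ_eq_map]
      rw [hsplitR, List.foldl_cons]
      have hfirst : (List.range C).foldl (fun (vis : List (Int × Int)) (j : Nat) =>
          dfsTraverse (R : Int) (C : Int) (R * C + 1) ((0 : Nat) : Int) (j : Int) vis) []
          = snakeList R C := by
        have hsplitC : List.range C = 0 :: List.map Nat.succ (List.range (C - 1)) := by
          conv_lhs => rw [show C = (C - 1) + 1 by omega]
          rw [List.range_succ_eq_map]
        rw [hsplitC, List.foldl_cons]
        have h00 : dfsTraverse (R : Int) (C : Int) (R * C + 1) ((0 : Nat) : Int) ((0 : Nat) : Int) []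
            = snakeList R C := by
          have h01 := traverse_snake R C hC0 (R * C) 0 (R * C + 1) (by omega)
            (Nat.mul_pos (by omega) hC0) (by omega)
          simpa [cellOf, Nat.zero_div, Nat.zero_mod, Nat.div_eq_of_lt hC0,
            Nat.mod_eq_of_lt hC0, List.take_zero] using h01
        rw [h00, List.foldl_map]
        exact foldl_fixed _ _ _ (fun j hj =>
          hmemtrav 0 (j + 1) (by omega) (by have := List.mem_range.mp hj; omega))
      rw [hfirst, List.foldl_map]
      refine foldl_fixed _ _ _ (fun x hx => ?_)
      exact hinner_snake (x + 1) (by have := List.mem_range.mp hx; omega)
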